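-- pv_equiv track=rewrite | github.com/Digitalized-Energy-Systems/monee | src/monee/simulation/timeseries.py | _merge_component_data
-- ===== SOURCE A (Python) =====
-- def _merge_component_data(target: dict, source: dict) -> dict:
--     """
--     Attribute-level merge of two ``{component_id: {attr: series}}`` dicts.
--
--     For each component id in *source*: if absent from *target*, add it
--     wholesale.  If present, merge attribute dicts with *target* winning on
--     conflicts (self-wins semantics).
--     """
--     result = dict(target)
--     for comp_id, attrs in source.items():
--         if comp_id in result:
--             result[comp_id] = {**attrs, **result[comp_id]}
--         else:
--             result[comp_id] = dict(attrs)
--     return result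
-- ===== SOURCE B (Python) =====
-- def _merge_component_data(target: dict, source: dict) -> dict:
--     """Staged replay instead of copy-then-branch: fix the component order
--     first, flatten all attribute writes into one (cid, attr, series) event
--     stream (source attrs before target attrs, so a later target write wins),
--     and replay it last-writer-wins into pre-seeded empty dicts."""
--     order = list(target) + [cid for cid in source if cid not in target]
--     events = [
--         (cid, k, v)
--         for cid in order
--         for k, v in (*source.get(cid, {}).items(), *target.get(cid, {}).items())
--     ]
--     result = {cid: {} for cid in order}
--     for cid, k, v in events:
--         result[cid][k] = v
--     return result
-- ===== Notes on version B (the rewrite author's own statement) =====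
-- stated objective: alternative
-- what changed: Replaces A's copy-then-branch merge (start from dict(target), per source id either **-merge or add) with a staged replay: fix the component order first, flatten every attribute write into one (cid, attr, series) event stream with source attrs emitted before target attrs, and fold the stream last-writer-wins into pre-seeded empty per-component dicts.
import Mathlib
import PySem

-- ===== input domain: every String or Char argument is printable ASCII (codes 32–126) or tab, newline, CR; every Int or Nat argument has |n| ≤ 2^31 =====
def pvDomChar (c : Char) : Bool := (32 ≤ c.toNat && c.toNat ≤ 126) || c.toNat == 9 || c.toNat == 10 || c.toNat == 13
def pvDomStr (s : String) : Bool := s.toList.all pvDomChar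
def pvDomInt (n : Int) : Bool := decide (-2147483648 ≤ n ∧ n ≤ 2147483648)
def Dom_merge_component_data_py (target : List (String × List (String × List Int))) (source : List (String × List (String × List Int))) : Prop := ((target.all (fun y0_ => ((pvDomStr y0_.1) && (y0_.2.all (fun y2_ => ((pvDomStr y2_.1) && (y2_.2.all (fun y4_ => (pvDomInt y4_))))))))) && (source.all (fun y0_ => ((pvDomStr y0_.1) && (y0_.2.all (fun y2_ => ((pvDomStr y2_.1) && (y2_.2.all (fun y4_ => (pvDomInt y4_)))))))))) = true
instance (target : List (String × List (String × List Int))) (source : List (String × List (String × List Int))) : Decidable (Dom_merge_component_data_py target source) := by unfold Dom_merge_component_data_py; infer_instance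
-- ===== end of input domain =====

-- B replaces A's copy-then-branch merge by a staged replay: component order first, then one flat
-- (cid, attr, series) event stream folded last-writer-wins into pre-seeded dicts (objective: alternative).


-- ===== PORT A =====
-- Python's {**a, **b}: a dict built from a, then overlaid with b's items (b wins)
def pyDictMerge (attrs tattrs : List (String × List Int)) : List (String × List Int) :=
  ((PySem.Dict.ofList attrs).update tattrs).items

def merge_component_data_py (target : List (String × List (String × List Int))) (source : List (String × List (String × List Int))) : List (String × List (String × List Int)) :=
  -- result = dict(target); for comp_id, attrs in source.items(): if comp_id in result … else …
  (source.foldl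
    (fun result p =>
      if result.contains p.1 then
        result.insert p.1 (pyDictMerge p.2 (result.getD p.1 []))
      else
        result.insert p.1 (PySem.Dict.ofList p.2).items)
    (PySem.Dict.ofList target)).items

-- ===== PORT B =====
-- order = list(target) + [cid for cid in source if cid not in target]
def pvOrder (target source : List (String × List (String × List Int))) : List String :=
  (PySem.Dict.ofList target).keys
    ++ (PySem.Dict.ofList source).keys.filter (fun c => !((PySem.Dict.ofList target).contains c))

-- the attribute pairs (*source.get(cid, {}).items(), *target.get(cid, {}).items()) of one component
def pvPairs (target source : List (String × List (String × List Int))) (c : String) : List (String × List Int) :=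
  (PySem.Dict.ofList ((PySem.Dict.ofList source).getD c [])).items
    ++ (PySem.Dict.ofList ((PySem.Dict.ofList target).getD c [])).items

-- events = [(cid, k, v) for cid in order for k, v in (*source.get(cid,{}).items(), *target.get(cid,{}).items())]
def pvEvents (target source : List (String × List (String × List Int))) : List (String × String × List Int) :=
  (pvOrder target source).flatMap (fun c => (pvPairs target source c).map (fun q => (c, q.1, q.2)))

-- result = {cid: {} for cid in order}
def pvSeeded (target source : List (String × List (String × List Int))) : PySem.Dict String (PySem.Dict String (List Int)) :=
  (pvOrder target source).foldl (fun d c => d.insert c PySem.Dict.empty) PySem.Dict.empty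

def merge_component_data_py_alt (target : List (String × List (String × List Int))) (source : List (String × List (String × List Int))) : List (String × List (String × List Int)) :=
  -- for cid, k, v in events: result[cid][k] = v
  -- (cid is always a key of result, so Python never raises; 'modify' with an unused default is exact here)
  ((pvEvents target source).foldl
      (fun d e => d.modify e.1 PySem.Dict.empty (fun inner => inner.insert e.2.1 e.2.2))
      (pvSeeded target source)).items.map (fun p => (p.1, p.2.items))

-- ===== PRECONDITION & SPEC =====
-- Pre_ excludes association lists with a duplicated key (at the component level or inside an
-- attribute dict): the Python arguments are dicts, whose association-list encoding never repeats
-- a key, so on duplicate-key lists neither program's behaviour is specified.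
def Pre_merge_component_data_py (target : List (String × List (String × List Int))) (source : List (String × List (String × List Int))) : Prop :=
  (target.map Prod.fst).Nodup ∧ (source.map Prod.fst).Nodup ∧
  (∀ p ∈ target, (p.2.map Prod.fst).Nodup) ∧ (∀ p ∈ source, (p.2.map Prod.fst).Nodup)
instance (target : List (String × List (String × List Int))) (source : List (String × List (String × List Int))) : Decidable (Pre_merge_component_data_py target source) := by unfold Pre_merge_component_data_py; infer_instance

def pvWitness_merge_component_data_py : (List (String × List (String × List Int))) × (List (String × List (String × List Int))) :=
  ([("a", [("p", [1]), ("q", [2])]), ("b", [("p", [3])])],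
   [("a", [("p", [7]), ("r", [8])]), ("c", [("s", [9])])])

def Spec_merge_component_data_py (target : List (String × List (String × List Int))) (source : List (String × List (String × List Int))) (out : List (String × List (String × List Int))) : Prop := out = merge_component_data_py_alt target source
instance (target : List (String × List (String × List Int))) (source : List (String × List (String × List Int))) (out : List (String × List (String × List Int))) : Decidable (Spec_merge_component_data_py target source out) := by unfold Spec_merge_component_data_py; infer_instance

-- ===== CLAIM (what is proved, stated in full; the proofs are below) =====
def Claim_equal_merge_component_data_py : Prop := ∀ (target : List (String × List (String × List Int))) (source : List (String × List (String × List Int))), Dom_merge_component_data_py target source → Pre_merge_component_data_py target source → Spec_merge_component_data_py target source (merge_component_data_py target source)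

-- ===== LEMMAS AND PROOFS =====

-- an association list with distinct keys is its own dict
theorem items_ofList_nodup {ν : Type} (ps : List (String × ν)) (h : (ps.map Prod.fst).Nodup) :
    (PySem.Dict.ofList ps).items = ps := by
  show (ps.foldl (fun acc p => acc.insert p.1 p.2) PySem.Dict.empty).items = ps
  rw [PySem.Dict.items_foldl_insert_fresh ps Prod.fst Prod.snd PySem.Dict.empty
      (fun a _ => by simp [PySem.Dict.contains_empty]) h]
  show [] ++ _ = ps
  simp

-- {**a, **b} built from the concatenated item stream
theorem pyDictMerge_eq_ofList_append (a b : List (String × List Int)) :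
    pyDictMerge a b = (PySem.Dict.ofList (a ++ b)).items := by
  unfold pyDictMerge
  congr 1
  show _ = (a ++ b).foldl (fun d q => d.insert q.1 q.2) PySem.Dict.empty
  rw [List.foldl_append]
  rfl

-- the value A's fold gives a pre-existing component entry q, in terms of the whole source list
def valS (s : List (String × List (String × List Int))) (q : String × List (String × List Int)) :
    String × List (String × List Int) :=
  match s.find? (fun p => p.1 == q.1) with
  | some p => (q.1, pyDictMerge p.2 q.2)
  | none => q

theorem foldA_items (s : List (String × List (String × List Int)))
    (t : PySem.Dict String (List (String × List Int)))
    (hs : (s.map Prod.fst).Nodup) (ht : t.keys.Nodup) :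
    (s.foldl
      (fun result p =>
        if result.contains p.1 then
          result.insert p.1 (pyDictMerge p.2 (result.getD p.1 []))
        else
          result.insert p.1 (PySem.Dict.ofList p.2).items)
      t).items
    = t.items.map (valS s)
      ++ (s.filter (fun p => !t.contains p.1)).map (fun p => (p.1, (PySem.Dict.ofList p.2).items)) := by
  induction s generalizing t with
  | nil => simp [show valS [] = id from funext fun q => rfl]
  | cons p s ih =>
    simp only [List.map_cons, List.nodup_cons] at hs
    obtain ⟨hp, hs'⟩ := hs
    simp only [List.foldl_cons, List.filter_cons]
    have hkeyS : ∀ q ∈ s, (q.1 == p.1) = false := by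
      intro q hq
      simp only [beq_eq_false_iff_ne]
      intro hEq
      exact hp (hEq ▸ List.mem_map_of_mem hq)
    have hmapS : ∀ q, (q.1 == p.1) = false → valS (p :: s) q = valS s q := by
      intro q hq
      have hne : (p.1 == q.1) = false := by
        simp only [beq_eq_false_iff_ne] at hq ⊢; exact hq.symm
      simp [valS, hne]
    by_cases hc : t.contains p.1 = true
    · rw [if_pos hc, hc]
      set w := pyDictMerge p.2 (t.getD p.1 []) with hw
      have hkeys : (t.insert p.1 w).keys = t.keys := PySem.Dict.keys_insert_of_contains t w hc
      rw [ih (t.insert p.1 w) hs' (hkeys ▸ ht)]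
      simp only [Bool.not_true, Bool.false_eq_true, if_false]
      congr 1
      · rw [PySem.Dict.items_insert_of_contains t w hc, List.map_map]
        apply List.map_congr_left
        intro q hq
        by_cases hqp : q.1 = p.1
        · have hqv : t.getD p.1 [] = q.2 :=
            PySem.Dict.getD_of_mem_items t (hqp ▸ hq : (p.1, q.2) ∈ t.items) ht []
          have hfind : s.find? (fun r => r.1 == p.1) = none := by
            rw [List.find?_eq_none]; intro r hr; simpa using hkeyS r hr
          simp only [Function.comp_apply, hqp, beq_self_eq_true, if_true]
          simp [valS, hfind, hqp, ← hqv, hw]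
        · have hne : (q.1 == p.1) = false := by simpa using hqp
          simp only [Function.comp_apply, hne, Bool.false_eq_true, if_false]
          exact (hmapS q hne).symm
      · have hfc : ∀ r ∈ s, (!(t.insert p.1 w).contains r.1) = (!t.contains r.1) :=
          fun r hr => by simp [PySem.Dict.contains_insert, hkeyS r hr]
        rw [List.filter_congr hfc]
    · rw [if_neg hc]
      have hcf : t.contains p.1 = false := by simpa using hc
      have hnotmem : p.1 ∉ t.keys := by
        rw [← PySem.Dict.contains_iff_mem_keys]; simp [hcf]
      have hkeys : (t.insert p.1 (PySem.Dict.ofList p.2).items).keys = t.keys ++ [p.1] :=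
        PySem.Dict.keys_insert_of_not_contains t _ hcf
      have ht' : (t.insert p.1 (PySem.Dict.ofList p.2).items).keys.Nodup := by
        rw [hkeys]
        exact ht.append (List.nodup_singleton _)
          (by intro a ha hb
              simp only [List.mem_singleton] at hb
              exact hnotmem (hb ▸ ha))
      rw [ih _ hs' ht']
      rw [PySem.Dict.items_insert_of_not_contains t _ hcf]
      have hkeyT : ∀ q ∈ t.items, (q.1 == p.1) = false := by
        intro q hq
        simp only [beq_eq_false_iff_ne]
        intro hEq
        exact hnotmem (hEq ▸ PySem.Dict.mem_keys_of_mem_items t hq)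
      have hfind : s.find? (fun r => r.1 == p.1) = none := by
        rw [List.find?_eq_none]; intro r hr; simpa using hkeyS r hr
      simp only [List.map_append, List.map_cons, List.map_nil]
      rw [List.map_congr_left (fun q hq => hmapS q (hkeyT q hq))]
      have hvp : valS s (p.1, (PySem.Dict.ofList p.2).items) = (p.1, (PySem.Dict.ofList p.2).items) := by
        simp [valS, hfind]
      have hfc : ∀ r ∈ s, (!(t.insert p.1 (PySem.Dict.ofList p.2).items).contains r.1) = (!t.contains r.1) :=
        fun r hr => by simp [PySem.Dict.contains_insert, hkeyS r hr]
      rw [List.filter_congr hfc]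
      simp [hcf, hvp]

-- ===== B-side lemmas: the event replay =====

-- the per-key value of the replay fold is the fold of that key's own events
theorem getD_foldl_step (l : List (String × String × List Int))
    (d : PySem.Dict String (PySem.Dict String (List Int))) (c : String) :
    (l.foldl (fun d e => d.modify e.1 PySem.Dict.empty (fun inner => inner.insert e.2.1 e.2.2)) d).getD
        c PySem.Dict.empty
    = ((l.filter (fun e => e.1 == c)).map (fun e => e.2)).foldl
        (fun i q => i.insert q.1 q.2) (d.getD c PySem.Dict.empty) := by
  induction l generalizing d with
  | nil => rfl
  | cons e l ih =>
    simp only [List.foldl_cons, List.filter_cons]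
    rw [ih]
    by_cases h : e.1 = c
    · have hb : (e.1 == c) = true := by simpa using h
      rw [hb]
      simp only [if_true, List.map_cons, List.foldl_cons]
      rw [PySem.Dict.getD_modify, if_pos h.symm, h]
    · have hb : (e.1 == c) = false := by simpa using h
      rw [hb]
      simp only [Bool.false_eq_true, if_false]
      rw [PySem.Dict.getD_modify, if_neg (fun hcc => h hcc.symm)]

-- the replay fold never changes the key list when every event's key already exists
theorem keys_foldl_step (l : List (String × String × List Int))
    (d : PySem.Dict String (PySem.Dict String (List Int)))
    (h : ∀ e ∈ l, d.contains e.1 = true) :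
    (l.foldl (fun d e => d.modify e.1 PySem.Dict.empty (fun inner => inner.insert e.2.1 e.2.2)) d).keys
      = d.keys := by
  induction l generalizing d with
  | nil => rfl
  | cons e l ih =>
    simp only [List.foldl_cons]
    rw [ih _ (fun e' he' => by
      rw [PySem.Dict.contains_modify]
      simp [h e' (List.mem_cons_of_mem _ he')])]
    rw [PySem.Dict.keys_modify, PySem.Dict.keys_insert_of_contains _ _ (h e List.mem_cons_self)]

-- filtering a flatMap of per-key blocks with distinct keys picks out one block
theorem filter_flatMap_block (os : List String) (ps : String → List (String × List Int)) (c : String)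
    (hn : os.Nodup) (hc : c ∈ os) :
    ((os.flatMap (fun c' => (ps c').map (fun q => (c', q.1, q.2)))).filter (fun e => e.1 == c))
      = (ps c).map (fun q => (c, q.1, q.2)) := by
  induction os with
  | nil => cases hc
  | cons o os ih =>
    simp only [List.flatMap_cons, List.filter_append]
    have hblock : ∀ (o' : String), (((ps o').map (fun q => (o', q.1, q.2))).filter (fun e => e.1 == c))
        = if o' = c then (ps o').map (fun q => (o', q.1, q.2)) else [] := by
      intro o'
      by_cases ho : o' = c
      · rw [if_pos ho, List.filter_eq_self.mpr]
        intro a ha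
        obtain ⟨q, _, rfl⟩ := List.mem_map.mp ha
        simpa using ho
      · rw [if_neg ho, List.filter_eq_nil_iff.mpr]
        intro a ha
        obtain ⟨q, _, rfl⟩ := List.mem_map.mp ha
        simpa using ho
    rcases List.mem_cons.mp hc with h | h
    · have hnoto : o ∉ os := (List.nodup_cons.mp hn).1
      have hnot : ∀ e ∈ os.flatMap (fun c' => (ps c').map (fun q => (c', q.1, q.2))),
          ¬((fun e => e.1 == c) e = true) := by
        intro e he
        obtain ⟨c', hc', he'⟩ := List.mem_flatMap.mp he
        obtain ⟨q, _, rfl⟩ := List.mem_map.mp he'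
        have : c' ≠ c := fun hEq => hnoto ((h.symm ▸ hEq : c' = o) ▸ hc')
        simpa using this
      rw [hblock o, if_pos h.symm, List.filter_eq_nil_iff.mpr hnot, List.append_nil, h]
    · have ho : o ≠ c := fun hEq => (List.nodup_cons.mp hn).1 (hEq ▸ h)
      rw [hblock o, if_neg ho, List.nil_append]
      exact ih (List.nodup_cons.mp hn).2 h

-- B's port, characterised: one entry per component of `order`, built from the concatenated streams
theorem B_char (target source : List (String × List (String × List Int)))
    (horder : (pvOrder target source).Nodup) :
    merge_component_data_py_alt target source
      = (pvOrder target source).map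
          (fun c => (c, (PySem.Dict.ofList (pvPairs target source c)).items)) := by
  have hseed_items : (pvSeeded target source).items
      = (pvOrder target source).map (fun c => (c, PySem.Dict.empty)) := by
    unfold pvSeeded
    rw [show (List.foldl (fun d c => d.insert c PySem.Dict.empty) PySem.Dict.empty
          (pvOrder target source))
        = (List.foldl (fun d a => d.insert (id a) ((fun _ => PySem.Dict.empty) a)) PySem.Dict.empty
          (pvOrder target source)) from rfl]
    rw [PySem.Dict.items_foldl_insert_fresh (pvOrder target source) id (fun _ => PySem.Dict.empty)
        PySem.Dict.empty (fun a _ => by simp [PySem.Dict.contains_empty]) (by simpa using horder)]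
    show (PySem.Dict.empty : PySem.Dict String (PySem.Dict String (List Int))).items ++ _ = _
    rw [show (PySem.Dict.empty : PySem.Dict String (PySem.Dict String (List Int))).items = [] from rfl,
        List.nil_append]
    rfl
  have hseed_keys : (pvSeeded target source).keys = pvOrder target source := by
    show (pvSeeded target source).items.map Prod.fst = _
    rw [hseed_items, List.map_map]
    show List.map id _ = _
    rw [List.map_id]
  have hseed_contains : ∀ c ∈ pvOrder target source, (pvSeeded target source).contains c = true := by
    intro c hc
    rw [PySem.Dict.contains_eq_decide_mem_keys, hseed_keys]
    simpa using hc
  have hres_keys : ((pvEvents target source).foldl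
      (fun d e => d.modify e.1 PySem.Dict.empty (fun inner => inner.insert e.2.1 e.2.2))
      (pvSeeded target source)).keys = pvOrder target source := by
    rw [keys_foldl_step, hseed_keys]
    intro e he
    obtain ⟨c, hc, he'⟩ := List.mem_flatMap.mp he
    obtain ⟨q, _, rfl⟩ := List.mem_map.mp he'
    exact hseed_contains c hc
  have hres_getD : ∀ c ∈ pvOrder target source,
      ((pvEvents target source).foldl
        (fun d e => d.modify e.1 PySem.Dict.empty (fun inner => inner.insert e.2.1 e.2.2))
        (pvSeeded target source)).getD c PySem.Dict.empty
      = PySem.Dict.ofList (pvPairs target source c) := by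
    intro c hc
    rw [getD_foldl_step]
    unfold pvEvents
    rw [filter_flatMap_block (pvOrder target source) (pvPairs target source) c horder hc]
    have hsg : (pvSeeded target source).getD c PySem.Dict.empty = PySem.Dict.empty :=
      PySem.Dict.getD_of_mem_items (pvSeeded target source)
        (hseed_items ▸ List.mem_map_of_mem hc) (hseed_keys ▸ horder) _
    rw [hsg, List.map_map]
    have hmap : List.map ((fun (e : String × String × List Int) => e.2)
          ∘ fun (q : String × List Int) => (c, q.1, q.2)) (pvPairs target source c)
        = pvPairs target source c := by
      simp
    rw [hmap]
    rfl
  unfold merge_component_data_py_alt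
  rw [PySem.Dict.items_eq_map_keys _ (hres_keys ▸ horder) PySem.Dict.empty, hres_keys, List.map_map]
  apply List.map_congr_left
  intro c hc
  simp only [Function.comp_apply]
  rw [hres_getD c hc]

-- ===== the main equivalence =====
theorem main (target source : List (String × List (String × List Int)))
    (htn : (target.map Prod.fst).Nodup) (hsn : (source.map Prod.fst).Nodup)
    (hti : ∀ p ∈ target, (p.2.map Prod.fst).Nodup)
    (hsi : ∀ p ∈ source, (p.2.map Prod.fst).Nodup) :
    merge_component_data_py target source = merge_component_data_py_alt target source := by
  have hti' : (PySem.Dict.ofList target).items = target := items_ofList_nodup target htn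
  have hsi' : (PySem.Dict.ofList source).items = source := items_ofList_nodup source hsn
  have htk : (PySem.Dict.ofList target).keys = target.map Prod.fst := by
    show (PySem.Dict.ofList target).items.map Prod.fst = _
    rw [hti']
  have hsk : (PySem.Dict.ofList source).keys = source.map Prod.fst := by
    show (PySem.Dict.ofList source).items.map Prod.fst = _
    rw [hsi']
  have htc : ∀ c, (PySem.Dict.ofList target).contains c = (target.map Prod.fst).contains c := by
    intro c
    rw [PySem.Dict.contains_eq_decide_mem_keys, htk, List.contains_eq_mem]
  -- getD on the two outer dicts
  have htget : ∀ p ∈ target, (PySem.Dict.ofList target).getD p.1 [] = p.2 := by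
    intro p hp
    refine PySem.Dict.getD_of_mem_items _ ?_ (htk ▸ htn) []
    rw [hti']
    exact hp
  have hsget : ∀ c, (PySem.Dict.ofList source).getD c []
      = ((source.find? (fun r => r.1 == c)).map Prod.snd).getD [] := by
    intro c
    show ((PySem.Dict.ofList source).get? c).getD [] = _
    show (((PySem.Dict.ofList source).items.find? (fun r => r.1 == c)).map Prod.snd).getD [] = _
    rw [hsi']
  have htget_none : ∀ c, (target.map Prod.fst).contains c = false →
      (PySem.Dict.ofList target).getD c [] = [] := by
    intro c hcf
    apply PySem.Dict.getD_of_not_contains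
    rw [htc]; exact hcf
  have horder : (pvOrder target source).Nodup := by
    unfold pvOrder
    rw [htk, hsk]
    refine List.Nodup.append htn (List.Nodup.filter _ hsn) ?_
    intro c hcT hcF
    have := (List.mem_filter.mp hcF).2
    simp only [htc, Bool.not_eq_true', List.contains_eq_mem, decide_eq_false_iff_not] at this
    exact this hcT
  -- A's side
  unfold merge_component_data_py
  rw [foldA_items source (PySem.Dict.ofList target) hsn (htk ▸ htn), hti']
  -- B's side
  rw [B_char target source horder]
  unfold pvOrder
  rw [htk, hsk, List.map_append]
  congr 1
  · -- target components
    rw [List.map_map]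
    apply List.map_congr_left
    intro p hp
    simp only [Function.comp_apply]
    unfold pvPairs
    rw [htget p hp, items_ofList_nodup p.2 (hti p hp), hsget p.1]
    unfold valS
    cases hfind : source.find? (fun r => r.1 == p.1) with
    | some q =>
      have hqmem : q ∈ source := List.mem_of_find?_eq_some hfind
      simp only [Option.map_some, Option.getD_some]
      rw [items_ofList_nodup q.2 (hsi q hqmem), pyDictMerge_eq_ofList_append]
    | none =>
      simp only [Option.map_none, Option.getD_none]
      have h0 : (PySem.Dict.ofList ([] : List (String × List Int))).items = [] := rfl
      rw [h0, List.nil_append, items_ofList_nodup p.2 (hti p hp)]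
  · -- source-only components
    have hfm : (source.map Prod.fst).filter (fun c => !((PySem.Dict.ofList target).contains c))
        = (source.filter (fun p => !((PySem.Dict.ofList target).contains p.1))).map Prod.fst := by
      rw [List.filter_map]
      rfl
    rw [hfm, List.map_map]
    apply List.map_congr_left
    intro p hp
    have hpmem : p ∈ source := List.mem_of_mem_filter hp
    have hpf : (PySem.Dict.ofList target).contains p.1 = false := by
      have := (List.mem_filter.mp hp).2
      simpa using this
    simp only [Function.comp_apply]
    unfold pvPairs
    have hsg : (PySem.Dict.ofList source).getD p.1 [] = p.2 := by
      refine PySem.Dict.getD_of_mem_items _ ?_ (hsk ▸ hsn) []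
      rw [hsi']
      exact hpmem
    rw [hsg, htget_none p.1 (by rw [← htc]; exact hpf)]
    have h0 : (PySem.Dict.ofList ([] : List (String × List Int))).items = [] := rfl
    rw [h0, List.append_nil, items_ofList_nodup p.2 (hsi p hpmem),
        items_ofList_nodup p.2 (hsi p hpmem)]

-- ===== VERDICT (by name: the statement is the Claim_ definition above) =====
theorem merge_component_data_py_spec : Claim_equal_merge_component_data_py := by
  intro target source _ hpre
  obtain ⟨htn, hsn, hti, hsi⟩ := hpre
  exact main target source htn hsn hti hsi
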